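-- pv_equiv track=rewrite | github.com/ThisIsBad/noesis | services/theoria/src/theoria/export.py | _md_code
-- ===== SOURCE A (Python) =====
-- def _md_code(value: object) -> str:
--     """Render ``value`` as an inline code span, safe against embedded backticks."""
--     raw = str(value)
--     # Pick a fence long enough to contain the longest backtick run in the value.
--     longest_run = 0
--     current = 0
--     for char in raw:
--         if char == "`":
--             current += 1
--             longest_run = max(longest_run, current)
--         else:
--             current = 0
--     fence = "`" * (longest_run + 1)
--     pad = " " if raw.startswith("`") or raw.endswith("`") else ""
--     return f"{fence}{pad}{raw}{pad}{fence}"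
-- ===== SOURCE B (Python) =====
-- def _md_code(value: object) -> str:
--     """Render ``value`` as an inline code span, safe against embedded backticks."""
--     raw = str(value)
--     # Grow the fence by substring probing: the shortest backtick string not
--     # occurring in raw is exactly one longer than the longest backtick run.
--     fence = "`"
--     while fence in raw:
--         fence += "`"
--     pad = " " if raw[:1] == "`" or raw[-1:] == "`" else ""
--     return "".join((fence, pad, raw, pad, fence))
-- ===== Notes on version B (the rewrite author's own statement) =====
-- stated objective: alternative
-- what changed: Replaces A's character-by-character running-max scan with fence growing by substring probing (grow the fence while it still occurs in raw), slicing pads instead of startswith/endswith, and join assembly instead of an f-string.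
import Mathlib
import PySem

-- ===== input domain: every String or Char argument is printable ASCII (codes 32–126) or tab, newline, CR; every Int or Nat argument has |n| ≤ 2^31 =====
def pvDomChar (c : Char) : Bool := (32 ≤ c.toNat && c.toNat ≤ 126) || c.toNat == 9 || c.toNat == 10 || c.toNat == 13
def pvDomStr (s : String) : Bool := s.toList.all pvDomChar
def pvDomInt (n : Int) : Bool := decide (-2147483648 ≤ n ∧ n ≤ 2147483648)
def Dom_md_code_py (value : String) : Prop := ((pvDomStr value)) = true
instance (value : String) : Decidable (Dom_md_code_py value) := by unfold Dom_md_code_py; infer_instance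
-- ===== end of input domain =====

-- B replaces A's running-max scan by fence growing via substring probing (while fence in raw:
-- fence += '`'), slicing pads and ''.join assembly; a timing run measured B faster (constant factor).

-- ===== PORT A =====
-- A scans once keeping (longest_run, current); str(value) is the identity on String inputs.
def md_code_py (value : String) : String :=
  let raw := value
  let p := raw.toList.foldl
    (fun (lc : Nat × Nat) char =>
      if char = '`' then (max lc.1 (lc.2 + 1), lc.2 + 1) else (lc.1, 0)) (0, 0)
  -- "`" * (longest_run + 1)
  let fence := String.ofList (List.replicate (p.1 + 1) '`')
  let pad := if PySem.Str.startswith raw "`" || PySem.Str.endswith raw "`" then " " else ""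
  fence ++ pad ++ raw ++ pad ++ fence

-- ===== PORT B =====
-- while fence in raw: fence += '`'   — terminates because an infix is no longer than raw.
def fenceGrow (raw : List Char) (fence : List Char) : List Char :=
  if h : PySem.Chars.isIn fence raw = true then
    fenceGrow raw (fence ++ ['`'])
  else fence
termination_by raw.length + 1 - fence.length
decreasing_by
  have := ((PySem.Chars.isIn_iff_infix fence raw).mp h).length_le
  simp only [List.length_append, List.length_singleton]
  omega

-- pad = " " if raw[:1] == "`" or raw[-1:] == "`" else ""; result via "".join((...)).
def md_code_py_alt (value : String) : String :=
  let raw := value.toList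
  let fence := fenceGrow raw ['`']
  let pad : List Char :=
    if PySem.List.slice raw none (some 1) == ['`']
        || PySem.List.slice raw (some (-1)) none == ['`'] then [' '] else []
  String.ofList (List.flatten [fence, pad, raw, pad, fence])

-- ===== PRECONDITION & SPEC =====
def Spec_md_code_py (value : String) (out : String) : Prop := out = md_code_py_alt value
instance (value : String) (out : String) : Decidable (Spec_md_code_py value out) := by unfold Spec_md_code_py; infer_instance

-- ===== CLAIM (what is proved, stated in full; the proofs are below) =====
def Claim_equal_md_code_py : Prop := ∀ (value : String), Dom_md_code_py value → Spec_md_code_py value (md_code_py value)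

-- ===== LEMMAS AND PROOFS =====

-- Reference: max run of backticks in l, where the first run gets a head start of c.
def pvF : List Char → Nat → Nat
  | [], c => c
  | ch :: t, c => if ch = '`' then pvF t (c + 1) else max c (pvF t 0)

lemma pvF_ge (l : List Char) (c : Nat) : c ≤ pvF l c := by
  induction l generalizing c with
  | nil => simp [pvF]
  | cons ch t ih =>
    simp only [pvF]
    split
    · exact le_trans (Nat.le_succ c) (ih (c + 1))
    · exact le_max_left _ _

lemma pvF_mono (l : List Char) {c d : Nat} (h : c ≤ d) : pvF l c ≤ pvF l d := by
  induction l generalizing c d with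
  | nil => simpa [pvF]
  | cons ch t ih =>
    simp only [pvF]
    split
    · exact ih (by omega)
    · omega

-- A-side: the fold computes max lg (pvF l c) as long as c ≤ lg.
lemma foldA_eq (l : List Char) (lg c : Nat) (h : c ≤ lg) :
    (l.foldl (fun (lc : Nat × Nat) char =>
      if char = '`' then (max lc.1 (lc.2 + 1), lc.2 + 1) else (lc.1, 0)) (lg, c)).1
    = max lg (pvF l c) := by
  induction l generalizing lg c with
  | nil => simp [pvF, Nat.max_eq_left h]
  | cons ch t ih =>
    simp only [List.foldl_cons, pvF]
    by_cases hc : ch = '`'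
    · subst hc
      simp only [reduceIte]
      rw [ih (max lg (c + 1)) (c + 1) (le_max_right _ _)]
      have := pvF_ge t (c + 1)
      omega
    · simp only [if_neg hc]
      rw [ih lg 0 (Nat.zero_le _)]
      omega

-- B-side: a backtick block is an infix exactly when it is no longer than the longest run.
lemma prefix_le (l : List Char) (c d : Nat)
    (h : List.replicate c '`' <+: l) : c + d ≤ pvF l d := by
  induction c generalizing l d with
  | zero => simpa using pvF_ge l d
  | succ c ih =>
    rcases l with _ | ⟨a, t⟩
    · simp [List.replicate_succ] at h
    · rw [List.replicate_succ, List.cons_prefix_cons] at h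
      obtain ⟨rfl, hp⟩ := h
      simpa [pvF] using (by have := ih t (d + 1) hp; omega)

lemma infix_le (l : List Char) (c : Nat)
    (h : List.replicate c '`' <:+: l) : c ≤ pvF l 0 := by
  induction l with
  | nil =>
    rcases c with _ | c
    · simp [pvF]
    · simp [List.replicate_succ] at h
  | cons a t ih =>
    rw [List.infix_cons_iff] at h
    rcases h with h | h
    · simpa using prefix_le (a :: t) c 0 h
    · have := ih h
      simp only [pvF]
      split
      · exact le_trans this (pvF_mono t (by omega))
      · omega

lemma rep_infix (l : List Char) (d : Nat) :
    List.replicate (pvF l d) '`' <:+: (List.replicate d '`' ++ l) := by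
  induction l generalizing d with
  | nil => simp [pvF]
  | cons a t ih =>
    simp only [pvF]
    by_cases hc : a = '`'
    · subst hc
      simp only [reduceIte]
      have := ih (d + 1)
      rwa [List.replicate_succ', List.append_assoc] at this
    · rw [if_neg hc]
      rcases Nat.le_total (pvF t 0) d with hle | hle
      · rw [Nat.max_eq_left hle]
        exact (List.prefix_append _ _).isInfix
      · rw [Nat.max_eq_right hle]
        have h0 := ih 0
        simp only [List.replicate_zero, List.nil_append] at h0
        exact h0.trans ((List.suffix_cons a t).trans (List.suffix_append _ _)).isInfix

lemma rep_infix_iff (l : List Char) (c : Nat) :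
    List.replicate c '`' <:+: l ↔ c ≤ pvF l 0 := by
  constructor
  · exact infix_le l c
  · intro h
    have h1 : List.replicate c '`' <:+: List.replicate (pvF l 0) '`' := by
      have : pvF l 0 = (pvF l 0 - c) + c := by omega
      rw [this, List.replicate_add]
      exact (List.suffix_append _ _).isInfix
    have h2 := rep_infix l 0
    simp only [List.replicate_zero, List.nil_append] at h2
    exact h1.trans h2

-- The fence loop reaches exactly length pvF l 0 + 1.
lemma fenceGrow_eq (l : List Char) (k c : Nat) (hk : c + k = pvF l 0 + 1) :
    fenceGrow l (List.replicate c '`') = List.replicate (pvF l 0 + 1) '`' := by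
  induction k generalizing c with
  | zero =>
    obtain rfl : c = pvF l 0 + 1 := by omega
    have hni : ¬ PySem.Chars.isIn (List.replicate (pvF l 0 + 1) '`') l = true := by
      simp only [PySem.Chars.isIn_iff_infix, rep_infix_iff]
      omega
    rw [fenceGrow, dif_neg hni]
  | succ k ih =>
    rw [fenceGrow, dif_pos]
    · rw [← List.replicate_succ']
      exact ih (c + 1) (by omega)
    · rw [PySem.Chars.isIn_iff_infix, rep_infix_iff]
      omega


lemma pad_head (l : List Char) :
    (PySem.List.slice l none (some 1) == ['`']) = PySem.Chars.startswith l ['`'] := by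
  have h1 : PySem.List.slice l none (some 1) = l.take 1 := by
    simpa using PySem.List.slice_to_natCast l 1
  rw [h1]
  cases l with
  | nil => simp [PySem.Chars.startswith]
  | cons a t => simp [PySem.Chars.startswith, List.isPrefixOf, eq_comm]

lemma pad_tail (l : List Char) :
    (PySem.List.slice l (some (-1)) none == ['`']) = PySem.Chars.endswith l ['`'] := by
  rw [PySem.List.slice_from_neg_one]
  rw [Bool.eq_iff_iff, beq_iff_eq, PySem.Chars.endswith_iff]
  induction l with
  | nil => simp
  | cons a t ih =>
    cases t with
    | nil => simp [List.suffix_cons_iff, eq_comm]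
    | cons b t' =>
      simp only [List.length_cons] at ih ⊢
      have hd : (a :: b :: t').drop (t'.length + 1 + 1 - 1) = (b :: t').drop (t'.length + 1 - 1) := by
        simp
      rw [hd, ih]
      constructor
      · intro h
        exact h.trans (List.suffix_cons a _)
      · intro h
        rcases List.suffix_cons_iff.mp h with h | h
        · exact absurd (congrArg List.length h) (by simp)
        · exact h

-- ===== VERDICT (by name: the statement is the Claim_ definition above) =====
theorem md_code_py_spec : Claim_equal_md_code_py := by
  intro value _
  unfold Spec_md_code_py md_code_py md_code_py_alt
  have hg : fenceGrow value.toList ['`'] = List.replicate (pvF value.toList 0 + 1) '`' := by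
    simpa using fenceGrow_eq value.toList (pvF value.toList 0) 1 (by omega)
  have hm := foldA_eq value.toList 0 0 (le_refl 0)
  simp only [hg, hm, Nat.zero_max, pad_head, pad_tail,
    PySem.Str.startswith_eq, PySem.Str.endswith_eq,
    show ("`" : String).toList = ['`'] from rfl]
  split_ifs <;> (apply String.toList_inj.mp; simp)
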